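-- pv_equiv track=rewrite | github.com/BUTSpeechFIT/BrnoLM | brnolm/oov_clustering/oov_alignment_lib.py | ind_ali_from_path
-- ===== SOURCE A (Python) =====
-- HORIZONAL_MOVE = 1
--
-- VERTICAL_MOVE = -1
--
-- def ind_ali_from_path(path):
--     alignment = []
--     ptr_a = 0
--     ptr_b = 0
--     inds_a = []
--     inds_b = []
--     for move in path:
--         if move == VERTICAL_MOVE:
--             inds_a.append(ptr_a)
--             ptr_a += 1
--         elif move == HORIZONAL_MOVE:
--             inds_b.append(ptr_b)
--             ptr_b += 1
--         else:
--             inds_a.append(ptr_a)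
--             inds_b.append(ptr_b)
--             ptr_a += 1
--             ptr_b += 1
--
--             alignment.append((inds_a, inds_b))
--             inds_a = []
--             inds_b = []
--
--     if len(inds_a) > 0 or len(inds_b) > 0:
--         assert(len(inds_a) == 0 or len(inds_b) == 0)
--         alignment[-1] = (
--             alignment[-1][0] + inds_a,
--             alignment[-1][1] + inds_b,
--         )
--
--     return alignment
-- ===== SOURCE B (Python) =====
-- def ind_ali_from_path(path):
--     # Pass 1: cut path into groups, each ending with a diagonal move; 'cur' is the trailing run.
--     groups = []
--     cur = []
--     for m in path:
--         cur.append(m)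
--         if m != -1 and m != 1:
--             groups.append(cur)
--             cur = []
--     # Pass 2: per group, the a-/b-indices are consecutive ranges determined by move counts.
--     alignment = []
--     ptr_a = 0
--     ptr_b = 0
--     for g in groups:
--         na = sum(1 for m in g if m != 1)
--         nb = sum(1 for m in g if m != -1)
--         alignment.append((list(range(ptr_a, ptr_a + na)),
--                           list(range(ptr_b, ptr_b + nb))))
--         ptr_a += na
--         ptr_b += nb
--     # A trailing run of non-diagonal moves extends the last group.
--     if cur:
--         na = sum(1 for m in cur if m == -1)
--         nb = sum(1 for m in cur if m == 1)
--         last_a, last_b = alignment[-1]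
--         alignment[-1] = (last_a + list(range(ptr_a, ptr_a + na)),
--                          last_b + list(range(ptr_b, ptr_b + nb)))
--     return alignment
-- ===== Notes on version B (the rewrite author's own statement) =====
-- stated objective: alternative
-- what changed: B first partitions the path into groups ending at each diagonal move, then computes each group's index lists as closed-form ranges from move counts, instead of A's single pass that appends indices one by one into mutable accumulators.
import Mathlib
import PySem

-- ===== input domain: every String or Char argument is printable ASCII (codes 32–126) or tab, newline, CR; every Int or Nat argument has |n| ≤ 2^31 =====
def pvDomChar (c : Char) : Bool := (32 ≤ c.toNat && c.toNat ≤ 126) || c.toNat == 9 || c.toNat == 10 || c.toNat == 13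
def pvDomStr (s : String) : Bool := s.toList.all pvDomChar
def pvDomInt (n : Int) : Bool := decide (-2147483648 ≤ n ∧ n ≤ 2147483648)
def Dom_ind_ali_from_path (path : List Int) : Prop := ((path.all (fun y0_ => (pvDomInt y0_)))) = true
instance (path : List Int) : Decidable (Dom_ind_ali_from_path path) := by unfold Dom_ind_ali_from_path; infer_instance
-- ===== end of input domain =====

-- B replaces A's single index-accumulating pass by a partition into diagonal-terminated groups
-- whose index lists are closed-form ranges computed from move counts (objective: alternative).

-- ===== PORT A =====
-- state: (alignment, ptr_a, ptr_b, inds_a, inds_b)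
def pvStepA (s : List (List Int × List Int) × Int × Int × List Int × List Int) (move : Int) :
    List (List Int × List Int) × Int × Int × List Int × List Int :=
  if move = -1 then (s.1, s.2.1 + 1, s.2.2.1, s.2.2.2.1 ++ [s.2.1], s.2.2.2.2)
  else if move = 1 then (s.1, s.2.1, s.2.2.1 + 1, s.2.2.2.1, s.2.2.2.2 ++ [s.2.2.1])
  else (s.1 ++ [(s.2.2.2.1 ++ [s.2.1], s.2.2.2.2 ++ [s.2.2.1])], s.2.1 + 1, s.2.2.1 + 1, [], [])

def ind_ali_from_path (path : List Int) : List (List Int × List Int) :=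
  let s := path.foldl pvStepA ([], 0, 0, [], [])
  if s.2.2.2.1.length > 0 ∨ s.2.2.2.2.length > 0 then
    -- Python asserts one of inds_a/inds_b is empty (AssertionError if not) and rewrites
    -- alignment[-1] (IndexError if alignment is empty); both raising cases are outside Pre_,
    -- the 'none' branch is a totalization guard only.
    match s.1.getLast? with
    | none => []
    | some last => s.1.dropLast ++ [(last.1 ++ s.2.2.2.1, last.2 ++ s.2.2.2.2)]
  else s.1

-- ===== PORT B =====
-- pass 1 state: (groups, cur)
def pvStepG (s : List (List Int) × List Int) (m : Int) : List (List Int) × List Int :=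
  let cur := s.2 ++ [m]
  if m ≠ -1 ∧ m ≠ 1 then (s.1 ++ [cur], []) else (s.1, cur)

-- pass 2 state: (alignment, ptr_a, ptr_b)
def pvStepP (s : List (List Int × List Int) × Int × Int) (g : List Int) :
    List (List Int × List Int) × Int × Int :=
  let na : Int := (g.countP (fun m => !(m == 1)) : Int)
  let nb : Int := (g.countP (fun m => !(m == -1)) : Int)
  (s.1 ++ [(PySem.List.pyRange s.2.1 (s.2.1 + na) 1, PySem.List.pyRange s.2.2 (s.2.2 + nb) 1)],
   s.2.1 + na, s.2.2 + nb)

def ind_ali_from_path_alt (path : List Int) : List (List Int × List Int) :=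
  let gc := path.foldl pvStepG ([], [])
  let st := gc.1.foldl pvStepP ([], 0, 0)
  if gc.2 ≠ [] then
    let na : Int := (gc.2.countP (fun m => m == -1) : Int)
    let nb : Int := (gc.2.countP (fun m => m == 1) : Int)
    -- alignment[-1] on an empty alignment raises IndexError in Python; outside Pre_ (guard only)
    match st.1.getLast? with
    | none => []
    | some last => st.1.dropLast ++ [(last.1 ++ PySem.List.pyRange st.2.1 (st.2.1 + na) 1,
                                      last.2 ++ PySem.List.pyRange st.2.2 (st.2.2 + nb) 1)]
  else st.1

-- ===== PRECONDITION & SPEC =====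
-- Pre_ excludes exactly the inputs on which Python A raises: a path whose moves are all
-- non-diagonal (±1) yet nonempty (IndexError on alignment[-1]) and a path whose trailing run of
-- non-diagonal moves mixes -1 and 1 (AssertionError).
def Pre_ind_ali_from_path (path : List Int) : Prop :=
  ((path.reverse.takeWhile (fun m => m == -1 || m == 1)).length = path.length → path = []) ∧
  ¬((-1 : Int) ∈ path.reverse.takeWhile (fun m => m == -1 || m == 1) ∧
    (1 : Int) ∈ path.reverse.takeWhile (fun m => m == -1 || m == 1))
instance (path : List Int) : Decidable (Pre_ind_ali_from_path path) := by
  unfold Pre_ind_ali_from_path; infer_instance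

def pvWitness_ind_ali_from_path : List Int := [-1, 1, 0, -1, -1, 0, 1]

def Spec_ind_ali_from_path (path : List Int) (out : List (List Int × List Int)) : Prop := out = ind_ali_from_path_alt path
instance (path : List Int) (out : List (List Int × List Int)) : Decidable (Spec_ind_ali_from_path path out) := by unfold Spec_ind_ali_from_path; infer_instance

-- ===== CLAIM (what is proved, stated in full; the proofs are below) =====
def Claim_equal_ind_ali_from_path : Prop := ∀ (path : List Int), Dom_ind_ali_from_path path → Pre_ind_ali_from_path path → Spec_ind_ali_from_path path (ind_ali_from_path path)

-- ===== LEMMAS AND PROOFS =====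

theorem pvStepA_neg (s : List (List Int × List Int) × Int × Int × List Int × List Int) :
    pvStepA s (-1) = (s.1, s.2.1 + 1, s.2.2.1, s.2.2.2.1 ++ [s.2.1], s.2.2.2.2) := by
  simp [pvStepA]

theorem pvStepA_pos (s : List (List Int × List Int) × Int × Int × List Int × List Int) :
    pvStepA s 1 = (s.1, s.2.1, s.2.2.1 + 1, s.2.2.2.1, s.2.2.2.2 ++ [s.2.2.1]) := by
  simp [pvStepA]

theorem pvStepA_diag (s : List (List Int × List Int) × Int × Int × List Int × List Int)
    (m : Int) (h1 : m ≠ -1) (h2 : m ≠ 1) :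
    pvStepA s m = (s.1 ++ [(s.2.2.2.1 ++ [s.2.1], s.2.2.2.2 ++ [s.2.2.1])],
      s.2.1 + 1, s.2.2.1 + 1, [], []) := by
  simp [pvStepA, h1, h2]

theorem pvStepG_nondiag (s : List (List Int) × List Int) (m : Int) (h : m = -1 ∨ m = 1) :
    pvStepG s m = (s.1, s.2 ++ [m]) := by
  rcases h with h | h <;> subst h <;> simp [pvStepG]

theorem pvStepG_diag (s : List (List Int) × List Int) (m : Int) (h1 : m ≠ -1) (h2 : m ≠ 1) :
    pvStepG s m = (s.1 ++ [s.2 ++ [m]], []) := by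
  simp [pvStepG, h1, h2]

theorem pv_countP_a (l : List Int) (h : ∀ x ∈ l, x = -1 ∨ x = 1) :
    l.countP (fun m => !(m == 1)) = l.countP (fun m => m == -1) := by
  induction l with
  | nil => rfl
  | cons y t ih =>
    have hy := h y (by simp)
    have ht := ih (fun x hx => h x (by simp [hx]))
    rcases hy with hy | hy <;> subst hy <;> simp [ht]

theorem pv_countP_b (l : List Int) (h : ∀ x ∈ l, x = -1 ∨ x = 1) :
    l.countP (fun m => !(m == -1)) = l.countP (fun m => m == 1) := by
  induction l with
  | nil => rfl
  | cons y t ih =>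
    have hy := h y (by simp)
    have ht := ih (fun x hx => h x (by simp [hx]))
    rcases hy with hy | hy <;> subst hy <;> simp [ht]

theorem pv_count_split (l : List Int) (h : ∀ x ∈ l, x = -1 ∨ x = 1) :
    l.countP (fun m => m == -1) + l.countP (fun m => m == 1) = l.length := by
  induction l with
  | nil => rfl
  | cons y t ih =>
    have hy := h y (by simp)
    have ht := ih (fun x hx => h x (by simp [hx]))
    rcases hy with hy | hy <;> subst hy <;> simp <;> omega

theorem pv_inv (p : List Int) :
    (p.foldl pvStepA ([], 0, 0, [], [])).1 = ((p.foldl pvStepG ([], [])).1.foldl pvStepP ([], 0, 0)).1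
    ∧ (p.foldl pvStepA ([], 0, 0, [], [])).2.1
        = ((p.foldl pvStepG ([], [])).1.foldl pvStepP ([], 0, 0)).2.1
          + ((p.foldl pvStepA ([], 0, 0, [], [])).2.2.2.1.length : Int)
    ∧ (p.foldl pvStepA ([], 0, 0, [], [])).2.2.1
        = ((p.foldl pvStepG ([], [])).1.foldl pvStepP ([], 0, 0)).2.2
          + ((p.foldl pvStepA ([], 0, 0, [], [])).2.2.2.2.length : Int)
    ∧ (p.foldl pvStepA ([], 0, 0, [], [])).2.2.2.1
        = PySem.List.pyRange ((p.foldl pvStepG ([], [])).1.foldl pvStepP ([], 0, 0)).2.1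
            (p.foldl pvStepA ([], 0, 0, [], [])).2.1 1
    ∧ (p.foldl pvStepA ([], 0, 0, [], [])).2.2.2.2
        = PySem.List.pyRange ((p.foldl pvStepG ([], [])).1.foldl pvStepP ([], 0, 0)).2.2
            (p.foldl pvStepA ([], 0, 0, [], [])).2.2.1 1
    ∧ (p.foldl pvStepG ([], [])).2.countP (fun m => m == -1)
        = (p.foldl pvStepA ([], 0, 0, [], [])).2.2.2.1.length
    ∧ (p.foldl pvStepG ([], [])).2.countP (fun m => m == 1)
        = (p.foldl pvStepA ([], 0, 0, [], [])).2.2.2.2.length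
    ∧ ∀ x ∈ (p.foldl pvStepG ([], [])).2, x = -1 ∨ x = 1 := by
  induction p using List.reverseRecOn with
  | nil =>
    refine ⟨rfl, by simp, by simp, ?_, ?_, rfl, rfl, by simp⟩ <;>
      simp [PySem.List.pyRange_one_eq_nil]
  | append_singleton p m ih =>
    obtain ⟨h1, h2, h3, h4, h5, h6, h7, h8⟩ := ih
    rw [List.foldl_append, List.foldl_append, List.foldl_cons, List.foldl_cons,
        List.foldl_nil, List.foldl_nil]
    by_cases hm1 : m = -1
    · subst hm1
      rw [pvStepA_neg, pvStepG_nondiag _ _ (Or.inl rfl)]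
      dsimp only
      have hle : ((p.foldl pvStepG ([], [])).1.foldl pvStepP ([], 0, 0)).2.1
          ≤ (p.foldl pvStepA ([], 0, 0, [], [])).2.1 := by omega
      refine ⟨h1, ?_, ?_, ?_, h5, ?_, ?_, ?_⟩
      · simp only [List.length_append, List.length_cons, List.length_nil]; push_cast; omega
      · simpa using h3
      · rw [PySem.List.pyRange_one_succ_right hle, h4]
      · simp [List.countP_append, h6]
      · simp [List.countP_append, h7]
      · intro x hx
        rcases List.mem_append.1 hx with hx | hx
        · exact h8 x hx
        · left; simpa using hx
    · by_cases hm2 : m = 1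
      · subst hm2
        rw [pvStepA_pos, pvStepG_nondiag _ _ (Or.inr rfl)]
        dsimp only
        have hle : ((p.foldl pvStepG ([], [])).1.foldl pvStepP ([], 0, 0)).2.2
            ≤ (p.foldl pvStepA ([], 0, 0, [], [])).2.2.1 := by omega
        refine ⟨h1, ?_, ?_, h4, ?_, ?_, ?_, ?_⟩
        · simpa using h2
        · simp only [List.length_append, List.length_cons, List.length_nil]; push_cast; omega
        · rw [PySem.List.pyRange_one_succ_right hle, h5]
        · simp [List.countP_append, h6]
        · simp [List.countP_append, h7]
        · intro x hx
          rcases List.mem_append.1 hx with hx | hx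
          · exact h8 x hx
          · right; simpa using hx
      · -- diagonal move
        rw [pvStepA_diag _ _ hm1 hm2, pvStepG_diag _ _ hm1 hm2]
        dsimp only
        rw [List.foldl_append, List.foldl_cons, List.foldl_nil]
        have hca : (((p.foldl pvStepG ([], [])).2 ++ [m]).countP (fun m => !(m == 1)) : Int)
            = ((p.foldl pvStepA ([], 0, 0, [], [])).2.2.2.1.length : Int) + 1 := by
          rw [List.countP_append, pv_countP_a _ h8, h6]
          simp [hm2]
        have hcb : (((p.foldl pvStepG ([], [])).2 ++ [m]).countP (fun m => !(m == -1)) : Int)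
            = ((p.foldl pvStepA ([], 0, 0, [], [])).2.2.2.2.length : Int) + 1 := by
          rw [List.countP_append, pv_countP_b _ h8, h7]
          simp [hm1]
        have hlea : ((p.foldl pvStepG ([], [])).1.foldl pvStepP ([], 0, 0)).2.1
            ≤ (p.foldl pvStepA ([], 0, 0, [], [])).2.1 := by omega
        have hleb : ((p.foldl pvStepG ([], [])).1.foldl pvStepP ([], 0, 0)).2.2
            ≤ (p.foldl pvStepA ([], 0, 0, [], [])).2.2.1 := by omega
        simp only [pvStepP, hca, hcb]
        have hea : ((p.foldl pvStepG ([], [])).1.foldl pvStepP ([], 0, 0)).2.1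
            + (((p.foldl pvStepA ([], 0, 0, [], [])).2.2.2.1.length : Int) + 1)
            = (p.foldl pvStepA ([], 0, 0, [], [])).2.1 + 1 := by omega
        have heb : ((p.foldl pvStepG ([], [])).1.foldl pvStepP ([], 0, 0)).2.2
            + (((p.foldl pvStepA ([], 0, 0, [], [])).2.2.2.2.length : Int) + 1)
            = (p.foldl pvStepA ([], 0, 0, [], [])).2.2.1 + 1 := by omega
        rw [hea, heb]
        refine ⟨?_, by simp, by simp, ?_, ?_, by simp, by simp, by simp⟩
        · rw [h1, PySem.List.pyRange_one_succ_right hlea,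
              PySem.List.pyRange_one_succ_right hleb, h4, h5]
        · dsimp only; simp [PySem.List.pyRange_one_eq_nil]
        · dsimp only; simp [PySem.List.pyRange_one_eq_nil]

-- ===== VERDICT (by name: the statement is the Claim_ definition above) =====
theorem ind_ali_from_path_spec : Claim_equal_ind_ali_from_path := by
  intro path _ _
  unfold Spec_ind_ali_from_path ind_ali_from_path ind_ali_from_path_alt
  obtain ⟨h1, h2, h3, h4, h5, h6, h7, h8⟩ := pv_inv path
  simp only []
  by_cases hc : (path.foldl pvStepG ([], [])).2 = []
  · have h6' : (path.foldl pvStepA ([], 0, 0, [], [])).2.2.2.1.length = 0 := by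
      rw [← h6, hc]; rfl
    have h7' : (path.foldl pvStepA ([], 0, 0, [], [])).2.2.2.2.length = 0 := by
      rw [← h7, hc]; rfl
    rw [if_neg (by omega), if_neg (by simp [hc]), h1]
  · have hlen := pv_count_split _ h8
    have hpos : 0 < (path.foldl pvStepA ([], 0, 0, [], [])).2.2.2.1.length
        + (path.foldl pvStepA ([], 0, 0, [], [])).2.2.2.2.length := by
      rw [← h6, ← h7, hlen]
      exact List.length_pos_of_ne_nil hc
    rw [if_pos (by omega), if_pos hc, h1]
    cases hl : ((path.foldl pvStepG ([], [])).1.foldl pvStepP ([], 0, 0)).1.getLast? with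
    | none => rfl
    | some last =>
      have hra : PySem.List.pyRange
          ((path.foldl pvStepG ([], [])).1.foldl pvStepP ([], 0, 0)).2.1
          (((path.foldl pvStepG ([], [])).1.foldl pvStepP ([], 0, 0)).2.1
            + (((path.foldl pvStepG ([], [])).2.countP (fun m => m == -1) : Nat) : Int)) 1
          = (path.foldl pvStepA ([], 0, 0, [], [])).2.2.2.1 := by
        rw [h6, show ((path.foldl pvStepG ([], [])).1.foldl pvStepP ([], 0, 0)).2.1
            + ((path.foldl pvStepA ([], 0, 0, [], [])).2.2.2.1.length : Int)
            = (path.foldl pvStepA ([], 0, 0, [], [])).2.1 from by omega]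
        exact h4.symm
      have hrb : PySem.List.pyRange
          ((path.foldl pvStepG ([], [])).1.foldl pvStepP ([], 0, 0)).2.2
          (((path.foldl pvStepG ([], [])).1.foldl pvStepP ([], 0, 0)).2.2
            + (((path.foldl pvStepG ([], [])).2.countP (fun m => m == 1) : Nat) : Int)) 1
          = (path.foldl pvStepA ([], 0, 0, [], [])).2.2.2.2 := by
        rw [h7, show ((path.foldl pvStepG ([], [])).1.foldl pvStepP ([], 0, 0)).2.2
            + ((path.foldl pvStepA ([], 0, 0, [], [])).2.2.2.2.length : Int)
            = (path.foldl pvStepA ([], 0, 0, [], [])).2.2.1 from by omega]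
        exact h5.symm
      rw [hra, hrb]
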